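-- pv_equiv track=rewrite | github.com/wherby/code | algorithm/bitManipulation/bit技巧/bitIncrease/向上向下最小cost.py | solve
-- ===== SOURCE A (Python) =====
-- def solve(nums, k, m):
--     # 我们需要记录当前这 m 个数已经被修改到了什么值
--     # 或者更简单的：由于我们要最大化 AND，我们可以直接维护这 m 个数
--     # 为了简化，我们每次都重新计算所有数达到 target 的最小代价
--
--     ans = 0
--     for j in range(30, -1, -1):
--         target = ans | (1 << j)
--         costs = []
--
--         for x in nums:
--             # 计算 x 变成任何一个 [满足 target 模式] 的数所需的最小步数
--             costs.append(get_min_cost(x, target))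
--
--         costs.sort()
--         # 只要目前最小的 m 个数能在总共 k 步内达到 target
--         if sum(costs[:m]) <= k:
--             ans = target
--
--     return ans
--
-- def get_min_cost(x, target):
--     if (x & target) == target:
--         return 0
--
--     # 找到 target 中 x 缺失的最高位 h
--     diff = target & ~x
--     h = diff.bit_length() - 1
--
--     # --- 向上找 (x_up) ---
--     # 高位保留, h位变1, 低位按 target 补全（target 低位必须为1的就为1，其余为0以求最小）
--     x_up = ((x >> (h + 1)) << (h + 1)) | (1 << h) | (target & ((1 << h) - 1))
--     cost_up = x_up - x
--
--     # --- 向下找 (x_down) ---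
--     cost_down = float('inf')
--     p = h + 1
--     # 向上寻找第一个能借位的点：x[p]==1 且 target[p]==0
--     while (1 << p) <= max(x, target):
--         bit = 1 << p
--         if (x & bit) and not (target & bit):
--             # 构造最大的 x_down：p位变0, 高位保留, 低位在满足 target 前提下全填1
--             # 这里的 (bit - 1) 保证了低位所有能填 1 的地方都填了 1
--             x_down = ((x >> (p + 1)) << (p + 1)) | (bit - 1)
--             # 既然 p > h，x_down 的第 h 位一定是 1，且低位所有 target 的 1 都能保留
--             cost_down = x - x_down
--             break
--         p += 1
--
--     return min(cost_up, cost_down)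
-- ===== SOURCE B (Python) =====
-- def solve(nums, k, m):
--     ans = 0
--     for j in range(30, -1, -1):
--         target = ans | (1 << j)
--         if sum_smallest(m, [min_cost(x, target) for x in nums]) <= k:
--             ans = target
--     return ans
--
-- def min_cost(x, target):
--     # minimum number of +1/-1 steps to turn x into a number y with y & target == target
--     if (x & target) == target:
--         return 0
--     h = (target & ~x).bit_length() - 1
--     up = ((((x >> (h + 1)) << (h + 1)) | (1 << h)) | (target & ((1 << h) - 1))) - x
--     down = None
--     for p in range(h + 1, max(x, target).bit_length()):
--         bit = 1 << p
--         if (x & bit) != 0 and (target & bit) == 0: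
--             down = x - (((x >> (p + 1)) << (p + 1)) | (bit - 1))
--             break
--     return up if down is None else min(up, down)
--
-- def sum_smallest(m, xs):
--     # quickselect-style partial selection: sum of the m smallest elements, no sort
--     total = 0
--     while True:
--         if m <= 0:
--             return total
--         if m >= len(xs):
--             return total + sum(xs)
--         p = xs[len(xs) // 2]
--         lo = [x for x in xs if x < p]
--         ne = xs.count(p)
--         if m <= len(lo):
--             xs = lo
--         elif m <= len(lo) + ne:
--             return total + sum(lo) + p * (m - len(lo))
--         else:
--             total += sum(lo) + p * ne
--             m -= len(lo) + ne
--             xs = [x for x in xs if x > p]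
-- ===== Notes on version B (the rewrite author's own statement) =====
-- stated objective: alternative
-- what changed: The per-bit feasibility test 'sum of the m smallest costs <= k' is computed by a quickselect-style three-way-partition selection (O(n) expected per bit) instead of fully sorting the cost list and summing a slice, and the cost list is built by a comprehension instead of append-in-a-loop; the bounded min-cost search runs over an explicit range instead of a while loop with a float('inf') sentinel.
-- outside the precondition, e.g. on solve([1, 2], 0, -1): A returns 2, B returns 2147483647
import Mathlib
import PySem

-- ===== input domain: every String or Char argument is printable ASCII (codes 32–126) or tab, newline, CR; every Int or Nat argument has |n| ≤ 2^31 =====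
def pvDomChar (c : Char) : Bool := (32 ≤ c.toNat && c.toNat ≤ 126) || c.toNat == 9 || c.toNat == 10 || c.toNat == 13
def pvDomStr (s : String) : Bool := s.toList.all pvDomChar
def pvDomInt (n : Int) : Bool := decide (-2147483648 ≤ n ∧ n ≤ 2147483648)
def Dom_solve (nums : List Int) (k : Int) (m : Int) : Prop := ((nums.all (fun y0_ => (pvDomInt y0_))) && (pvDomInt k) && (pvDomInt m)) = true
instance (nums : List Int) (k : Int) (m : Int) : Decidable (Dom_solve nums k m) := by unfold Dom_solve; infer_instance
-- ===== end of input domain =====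

-- B replaces A's per-bit "sort the whole cost list and sum a slice" test by a quickselect-style
-- three-way-partition selection of the m smallest costs (objective: alternative algorithm).

-- ===== PORT A =====

-- termination helper for A's while loop, cited by name in decreasing_by
theorem pvShiftLeLtBitLength {M : Int} {n : Nat} (h : (1:Int) <<< n ≤ M) :
    n < PySem.Int.bitLength M := by
  have h2 : (2:Int) ^ n ≤ M := by simpa [Int.shiftLeft_eq] using h
  have hM : (0:Int) ≤ M := le_trans (by positivity) h2
  have h3 : (2:Nat) ^ n ≤ M.natAbs := by
    have : ((2:Nat) ^ n : Int) ≤ (M.natAbs : Int) := by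
      rw [Int.natAbs_of_nonneg hM]; exact_mod_cast h2
    exact_mod_cast this
  have h4 := PySem.Int.lt_two_pow_bitLength M
  exact (Nat.pow_lt_pow_iff_right (by norm_num)).mp (lt_of_le_of_lt h3 h4)

-- A's while loop "vers le bas": first p ≥ start with x[p]=1, target[p]=0, while 1<<p ≤ M
def costDownLoopA (x target M p : Int) : Option Int :=
  if h : (1 : Int) <<< p.toNat ≤ M then
    let bit : Int := (1 : Int) <<< p.toNat
    if PySem.Int.band x bit ≠ 0 ∧ PySem.Int.band target bit = 0 then
      some (x - PySem.Int.bor ((x >>> (p.toNat + 1)) <<< (p.toNat + 1)) (bit - 1))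
    else costDownLoopA x target M (p + 1)
  else none
termination_by ((PySem.Int.bitLength M : Int) - p).toNat
decreasing_by
  have := pvShiftLeLtBitLength h
  omega

def getMinCost (x target : Int) : Int :=
  if PySem.Int.band x target = target then 0
  else
    let diff := PySem.Int.band target (Int.not x)
    let h : Nat := PySem.Int.bitLength diff - 1
    let xUp : Int := PySem.Int.bor (PySem.Int.bor ((x >>> (h + 1)) <<< (h + 1)) ((1:Int) <<< h))
        (PySem.Int.band target (((1:Int) <<< h) - 1))
    let costUp := xUp - x
    -- cost_down = float('inf') encoded as none; min(cost_up, inf) = cost_up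
    match costDownLoopA x target (max x target) ((h : Int) + 1) with
    | none => costUp
    | some cd => min costUp cd

def solve (nums : List Int) (k : Int) (m : Int) : Int :=
  (PySem.List.pyRange 30 (-1) (-1)).foldl (fun ans j =>
    let jn : Nat := j.toNat
    let target := PySem.Int.bor ans ((1 : Int) <<< jn)
    let costs := nums.foldl (fun acc x => acc ++ [getMinCost x target]) ([] : List Int)
    let sortedCosts := PySem.List.sorted costs (fun c => c) false
    if (PySem.List.slice sortedCosts none (some m)).sum ≤ k then target else ans) 0

-- ===== PORT B =====

def minCostAlt (x target : Int) : Int :=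
  if PySem.Int.band x target = target then 0
  else
    let h : Nat := PySem.Int.bitLength (PySem.Int.band target (Int.not x)) - 1
    let up : Int := PySem.Int.bor (PySem.Int.bor ((x >>> (h + 1)) <<< (h + 1)) ((1:Int) <<< h))
        (PySem.Int.band target (((1:Int) <<< h) - 1)) - x
    -- for p in range(h+1, max(x,target).bit_length()) with break: first hit
    let down := (PySem.List.pyRange ((h : Int) + 1) (PySem.Int.bitLength (max x target) : Int) 1).findSome?
      (fun q =>
        let t : Nat := q.toNat
        let bit : Int := (1 : Int) <<< t
        if PySem.Int.band x bit ≠ 0 ∧ PySem.Int.band target bit = 0 then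
          some (x - PySem.Int.bor ((x >>> (t + 1)) <<< (t + 1)) (bit - 1))
        else none)
    match down with
    | none => up
    | some d => min up d

-- the middle element xs[len(xs)//2] is a member (termination of the partition loop cites this)
theorem pvPivotMem (p0 : Int) (tl : List Int) :
    PySem.List.pyGetD (p0 :: tl) (PySem.Int.floordiv ((p0 :: tl).length : Int) 2) 0 ∈ p0 :: tl := by
  have h2 : PySem.Int.floordiv ((p0 :: tl).length : Int) 2 = (((p0 :: tl).length / 2 : Nat) : Int) := by
    exact_mod_cast PySem.Int.floordiv_natCast (p0 :: tl).length 2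
  have hlt : (p0 :: tl).length / 2 < (p0 :: tl).length := by simp; omega
  rw [h2, PySem.List.pyGetD_natCast, List.getD_eq_getElem _ _ hlt]
  exact List.getElem_mem hlt

-- the while loop of Source B's sum_smallest (quickselect-style three-way partition, middle pivot)
def sumSmallestLoop (m : Int) (xs : List Int) (total : Int) : Int :=
  if m ≤ 0 then total
  else if (xs.length : Int) ≤ m then total + xs.sum
  else match xs with
    | [] => total                                  -- unreachable: 0 < m < length
    | p0 :: tl =>
      let p := PySem.List.pyGetD (p0 :: tl) (PySem.Int.floordiv ((p0 :: tl).length : Int) 2) 0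
      let lo := (p0 :: tl).filter (fun y => decide (y < p))
      let ne : Int := (PySem.List.count (p0 :: tl) p : Int)
      if m ≤ (lo.length : Int) then sumSmallestLoop m lo total
      else if m ≤ (lo.length : Int) + ne then total + lo.sum + p * (m - (lo.length : Int))
      else sumSmallestLoop (m - (lo.length : Int) - ne)
            ((p0 :: tl).filter (fun y => decide (p < y)))
            (total + lo.sum + p * ne)
termination_by xs.length
decreasing_by
  · exact List.length_filter_lt_length_iff_exists.mpr ⟨_, pvPivotMem p0 tl, by simp⟩
  · exact List.length_filter_lt_length_iff_exists.mpr ⟨_, pvPivotMem p0 tl, by simp⟩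

def sumSmallest (m : Int) (xs : List Int) : Int := sumSmallestLoop m xs 0

def solve_alt (nums : List Int) (k : Int) (m : Int) : Int :=
  (PySem.List.pyRange 30 (-1) (-1)).foldl (fun ans j =>
    let jn : Nat := j.toNat
    let target := PySem.Int.bor ans ((1 : Int) <<< jn)
    if sumSmallest m (nums.map (fun x => minCostAlt x target)) ≤ k then target else ans) 0

-- ===== PRECONDITION & SPEC =====
-- Pre_ excludes negative m (a negative count of numbers to modify is outside the task's natural
-- domain; A's value there comes from Python's negative-slice semantics in costs[:m]).
def Pre_solve (nums : List Int) (k : Int) (m : Int) : Prop := 0 ≤ m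
instance (nums : List Int) (k : Int) (m : Int) : Decidable (Pre_solve nums k m) := by unfold Pre_solve; infer_instance

def pvWitness_solve : List Int × Int × Int := ([1, 2], 1, 1)

def Spec_solve (nums : List Int) (k : Int) (m : Int) (out : Int) : Prop := out = solve_alt nums k m
instance (nums : List Int) (k : Int) (m : Int) (out : Int) : Decidable (Spec_solve nums k m out) := by unfold Spec_solve; infer_instance

-- ===== CLAIM (what is proved, stated in full; the proofs are below) =====
def Claim_equal_solve : Prop := ∀ (nums : List Int) (k : Int) (m : Int), Dom_solve nums k m → Pre_solve nums k m → Spec_solve nums k m (solve nums k m)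

-- ===== LEMMAS AND PROOFS =====

-- A's while loop is B's first-hit scan over range(p, M.bit_length())
theorem pvCostDownEq (x target M : Int) (hM : 1 ≤ M) :
    ∀ (n : Nat) (p : Int), 0 ≤ p → (PySem.Int.bitLength M : Int) - p ≤ n →
    costDownLoopA x target M p =
      (PySem.List.pyRange p (PySem.Int.bitLength M : Int) 1).findSome? (fun q =>
        let t : Nat := q.toNat
        let bit : Int := (1 : Int) <<< t
        if PySem.Int.band x bit ≠ 0 ∧ PySem.Int.band target bit = 0 then
          some (x - PySem.Int.bor ((x >>> (t + 1)) <<< (t + 1)) (bit - 1))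
        else none) := by
  intro n
  induction n with
  | zero =>
    intro p hp hn
    have hbl : (PySem.Int.bitLength M : Int) ≤ p := by omega
    rw [PySem.List.pyRange_one_eq_nil hbl, List.findSome?_nil]
    rw [costDownLoopA]
    have hcond : ¬ (1 : Int) <<< p.toNat ≤ M := by
      intro hc
      have := pvShiftLeLtBitLength hc
      omega
    simp [hcond]
  | succ n ih =>
    intro p hp hn
    by_cases hlt : p < (PySem.Int.bitLength M : Int)
    · have hshift : (1 : Int) <<< p.toNat ≤ M := by
        have hne : M ≠ 0 := by omega
        have h3 := PySem.Int.two_pow_bitLength_le M hne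
        have hpn : p.toNat ≤ PySem.Int.bitLength M - 1 := by omega
        have hpow : (2:Nat) ^ p.toNat ≤ (2:Nat) ^ (PySem.Int.bitLength M - 1) :=
          Nat.pow_le_pow_right (by norm_num) hpn
        have : (2:Nat) ^ p.toNat ≤ M.natAbs := le_trans hpow h3
        have hcast : ((2:Nat) ^ p.toNat : Int) ≤ (M.natAbs : Int) := by exact_mod_cast this
        rw [Int.natAbs_of_nonneg (by omega)] at hcast
        calc (1 : Int) <<< p.toNat = (2:Int) ^ p.toNat := by simp [Int.shiftLeft_eq]
        _ ≤ M := by push_cast at hcast; exact hcast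
      rw [PySem.List.pyRange_one_cons hlt, List.findSome?_cons]
      rw [costDownLoopA]
      rw [dif_pos hshift]
      by_cases hc : PySem.Int.band x ((1 : Int) <<< p.toNat) ≠ 0 ∧ PySem.Int.band target ((1 : Int) <<< p.toNat) = 0
      · rw [if_pos hc, if_pos hc]
      · rw [if_neg hc, if_neg hc]
        rw [ih (p+1) (by omega) (by omega)]
    · have hbl : (PySem.Int.bitLength M : Int) ≤ p := by omega
      rw [PySem.List.pyRange_one_eq_nil hbl, List.findSome?_nil]
      rw [costDownLoopA]
      have hcond : ¬ (1 : Int) <<< p.toNat ≤ M := by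
        intro hc
        have := pvShiftLeLtBitLength hc
        omega
      simp [hcond]

theorem pvMinCostEq (x target : Int) (ht : 1 ≤ target) : getMinCost x target = minCostAlt x target := by
  unfold getMinCost minCostAlt
  by_cases hb : PySem.Int.band x target = target
  · simp only [if_pos hb]
  · simp only [if_neg hb]
    have hM : (1:Int) ≤ max x target := le_trans ht (le_max_right _ _)
    rw [pvCostDownEq x target (max x target) hM
      (((PySem.Int.bitLength (max x target) : Int) - ((PySem.Int.bitLength (PySem.Int.band target (Int.not x)) - 1 : Nat) + 1)).toNat)
      _ (by positivity) (by omega)]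

-- three-way split of sorted(xs) around a pivot
theorem pvSortedSplit (xs : List Int) (p : Int) :
    PySem.List.sorted xs (fun c => c) false =
      PySem.List.sorted (xs.filter (fun y => decide (y < p))) (fun c => c) false
      ++ List.replicate (xs.count p) p
      ++ PySem.List.sorted (xs.filter (fun y => decide (p < y))) (fun c => c) false := by
  apply PySem.List.sorted_id_eq_of_perm_of_pairwise
  · -- perm to xs
    have h1 := List.filter_append_perm (fun y => decide (y < p)) xs
    have h2 := List.filter_append_perm (fun y => decide (y = p)) (xs.filter (fun y => !decide (y < p)))
    rw [List.filter_filter, List.filter_filter] at h2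
    have e1 : xs.filter (fun y => decide (y = p) && !decide (y < p)) = xs.filter (fun y => y == p) := by
      apply List.filter_congr
      intro y _
      by_cases h : y = p <;> simp [h]
    have e2 : xs.filter (fun y => !decide (y = p) && !decide (y < p)) = xs.filter (fun y => decide (p < y)) := by
      apply List.filter_congr
      intro y _
      by_cases h1 : y = p <;> by_cases h2 : y < p <;> simp [h1, h2] <;> omega
    rw [e1, e2, List.filter_beq] at h2
    rw [List.append_assoc]
    refine List.Perm.trans (List.Perm.trans ?_ (List.Perm.append_left _ h2)) h1
    exact List.Perm.append (PySem.List.sorted_perm _ _ _)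
      (List.Perm.append (List.Perm.refl _) (PySem.List.sorted_perm _ _ _))
  · -- pairwise ≤
    simp only [List.append_assoc]
    rw [List.pairwise_append]
    refine ⟨?_, ?_, ?_⟩
    · simpa using PySem.List.sorted_pairwise (xs.filter (fun y => decide (y < p))) (fun c => c)
    · rw [List.pairwise_append]
      refine ⟨List.pairwise_replicate.mpr (Or.inr le_rfl), ?_, ?_⟩
      · simpa using PySem.List.sorted_pairwise (xs.filter (fun y => decide (p < y))) (fun c => c)
      · intro a ha b hb
        have ha' : a = p := List.eq_of_mem_replicate ha
        have hb' : b ∈ xs.filter (fun y => decide (p < y)) := (PySem.List.mem_sorted _ _ _ _).mp hb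
        have := (List.mem_filter.mp hb').2
        simp at this
        omega
    · intro a ha b hb
      have ha' : a ∈ xs.filter (fun y => decide (y < p)) := (PySem.List.mem_sorted _ _ _ _).mp ha
      have h1 := (List.mem_filter.mp ha').2
      simp at h1
      rcases List.mem_append.mp hb with hb1 | hb2
      · have : b = p := List.eq_of_mem_replicate hb1
        omega
      · have hb' : b ∈ xs.filter (fun y => decide (p < y)) := (PySem.List.mem_sorted _ _ _ _).mp hb2
        have h2 := (List.mem_filter.mp hb').2
        simp at h2
        omega

-- the partial selection computes total + sum of the m smallest
theorem pvSumSmallestEq :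
    ∀ (N : Nat) (xs : List Int), xs.length ≤ N → ∀ (m total : Int), 0 ≤ m →
    sumSmallestLoop m xs total =
      total + ((PySem.List.sorted xs (fun c => c) false).take m.toNat).sum := by
  intro N
  induction N with
  | zero =>
    intro xs hxs m total hm
    have : xs = [] := List.eq_nil_of_length_eq_zero (by omega)
    subst this
    rw [sumSmallestLoop.eq_def]
    simp [PySem.List.sorted]
  | succ N ih =>
    intro xs hxs m total hm
    rw [sumSmallestLoop.eq_def]
    by_cases hm0 : m ≤ 0
    · have : m = 0 := by omega
      subst this
      simp
    · rw [if_neg hm0]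
      by_cases hlen : (xs.length : Int) ≤ m
      · rw [if_pos hlen]
        have hlen2 : (PySem.List.sorted xs (fun c => c) false).length ≤ m.toNat := by
          rw [PySem.List.length_sorted]; omega
        rw [List.take_of_length_le hlen2]
        rw [(PySem.List.sorted_perm _ _ _).sum_eq]
      · rw [if_neg hlen]
        match xs with
        | [] => simp at hlen; omega
        | p :: tl =>
          simp only []
          set q := PySem.List.pyGetD (p :: tl) (PySem.Int.floordiv ((p :: tl).length : Int) 2) 0 with hq
          set lo := (p :: tl).filter (fun y => decide (y < q)) with hlo
          set gt := (p :: tl).filter (fun y => decide (q < y)) with hgt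
          set ne : Nat := (p :: tl).count q with hne
          have hqmem : q ∈ p :: tl := pvPivotMem p tl
          have hsplit := pvSortedSplit (p :: tl) q
          have hlolen : (PySem.List.sorted lo (fun c => c) false).length = lo.length := PySem.List.length_sorted _ _ _
          have hlolt : lo.length < (p :: tl).length :=
            List.length_filter_lt_length_iff_exists.mpr ⟨q, hqmem, by simp⟩
          have hgtlt : gt.length < (p :: tl).length :=
            List.length_filter_lt_length_iff_exists.mpr ⟨q, hqmem, by simp⟩
          have hcnt : PySem.List.count (p :: tl) q = (p :: tl).count q := PySem.List.count_eq _ _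
          rw [hsplit, List.append_assoc, List.take_append, hlolen]
          by_cases h1 : m ≤ (lo.length : Int)
          · rw [if_pos (by rw [hcnt] at *; exact h1)]
            have : m.toNat - lo.length = 0 := by omega
            rw [this, List.take_zero, List.append_nil]
            exact ih lo (by omega) m total hm
          · rw [if_neg (by rw [hcnt] at *; exact h1)]
            have hS1 : List.take m.toNat (PySem.List.sorted lo (fun c => c) false)
                = PySem.List.sorted lo (fun c => c) false :=
              List.take_of_length_le (by omega)
            rw [hS1, List.take_append, List.take_replicate]
            by_cases h2 : m ≤ (lo.length : Int) + (ne : Int)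
            · rw [if_pos (by rw [hcnt]; exact h2)]
              have hmin : min (m.toNat - lo.length) (List.count q (p :: tl)) = m.toNat - lo.length := by
                omega
              rw [hmin]
              have hz : m.toNat - lo.length - (List.replicate (List.count q (p :: tl)) q).length = 0 := by
                rw [List.length_replicate]; omega
              rw [hz, List.take_zero]
              have hcast : ((m.toNat - lo.length : Nat) : Int) = m - ↑lo.length := by omega
              simp [List.sum_append, (PySem.List.sorted_perm _ _ _).sum_eq, hcast]
              ring
            · rw [if_neg (by rw [hcnt]; exact h2)]
              have hmin2 : min (m.toNat - lo.length) (List.count q (p :: tl)) = List.count q (p :: tl) := by omega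
              rw [hmin2]
              have hlen2 : (m - ↑lo.length - ↑(PySem.List.count (p :: tl) q)).toNat
                  = m.toNat - lo.length - (List.replicate (List.count q (p :: tl)) q).length := by
                rw [List.length_replicate, ← hcnt]; omega
              rw [ih gt (by omega) (m - ↑lo.length - ↑(PySem.List.count (p :: tl) q))
                    (total + lo.sum + q * ↑(PySem.List.count (p :: tl) q))
                    (by rw [hcnt]; omega),
                  hlen2]
              simp [List.sum_append, (PySem.List.sorted_perm _ _ _).sum_eq, ← hgt]
              ring

theorem pvFoldlInv (l : List Int) (fA fB : Int → Int → Int) (inv : Int → Prop)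
    (hpres : ∀ b j, inv b → inv (fA b j))
    (heq : ∀ b j, inv b → fA b j = fB b j) :
    ∀ a, inv a → l.foldl fA a = l.foldl fB a := by
  induction l with
  | nil => intro a _; rfl
  | cons j t ih =>
    intro a ha
    rw [List.foldl_cons, List.foldl_cons, ← heq a j ha]
    exact ih (fA a j) (hpres a j ha)

-- ===== VERDICT (by name: the statement is the Claim_ definition above) =====
theorem solve_spec : Claim_equal_solve := by
  unfold Claim_equal_solve Spec_solve Pre_solve
  intro nums k m _ hm
  unfold solve solve_alt
  refine pvFoldlInv _ _ _ (fun b => 0 ≤ b) ?_ ?_ 0 le_rfl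
  · intro b j hb
    have h0 : (0:Int) ≤ (1:Int) <<< j.toNat := by
      rw [Int.shiftLeft_eq]; positivity
    show 0 ≤ if (PySem.List.slice (PySem.List.sorted (nums.foldl
          (fun acc x => acc ++ [getMinCost x (PySem.Int.bor b ((1:Int) <<< j.toNat))]) ([]:List Int))
          (fun c => c) false) none (some m)).sum ≤ k
        then PySem.Int.bor b ((1:Int) <<< j.toNat) else b
    split_ifs with hc
    · rw [PySem.Int.bor_of_nonneg hb h0]; positivity
    · exact hb
  · intro b j hb
    have h0 : (0:Int) ≤ (1:Int) <<< j.toNat := by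
      rw [Int.shiftLeft_eq]; positivity
    have h1 : (1:Int) ≤ (1:Int) <<< j.toNat := by
      rw [Int.shiftLeft_eq]
      have : (0:Int) < 2 ^ j.toNat := by positivity
      omega
    have htar : 1 ≤ PySem.Int.bor b ((1:Int) <<< j.toNat) := by
      rw [PySem.Int.bor_of_nonneg hb h0]
      have h2 := Nat.right_le_or (n := b.toNat) (m := ((1:Int) <<< j.toNat).toNat)
      omega
    show (if (PySem.List.slice (PySem.List.sorted (nums.foldl
          (fun acc x => acc ++ [getMinCost x (PySem.Int.bor b ((1:Int) <<< j.toNat))]) ([]:List Int))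
          (fun c => c) false) none (some m)).sum ≤ k
        then PySem.Int.bor b ((1:Int) <<< j.toNat) else b)
      = (if sumSmallest m (nums.map (fun x => minCostAlt x (PySem.Int.bor b ((1:Int) <<< j.toNat)))) ≤ k
        then PySem.Int.bor b ((1:Int) <<< j.toNat) else b)
    generalize hgen : PySem.Int.bor b ((1:Int) <<< j.toNat) = t at htar ⊢
    rw [PySem.List.foldl_append_singleton_eq_map, List.nil_append]
    simp only [show ∀ x, getMinCost x t = minCostAlt x t from fun x => pvMinCostEq x t htar]
    rw [PySem.List.slice_to _ hm]
    unfold sumSmallest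
    rw [pvSumSmallestEq (nums.map (fun x => minCostAlt x t)).length _ le_rfl m 0 hm, zero_add]
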